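-- pv_equiv track=rewrite | github.com/nishio/atcoder | libs/accum_dp.py | dp_with_accum
-- ===== SOURCE A (Python) =====
-- def dp_with_accum(N, K, SS):
--     count = [0] * (N + 10)
--     accum = [0] * (N + 10)
--
--     # initial value
--     accum[0] = count[0] = 1
--     MOD = 998244353
--
--     for pos in range(1, N):
--         # calc new value
--         next_value = 0
--         for left, right in SS:
--             start = pos - right
--             end = pos - left
--             next_value += (accum[end] - accum[start - 1])
--             next_value %= MOD
--
--         count[pos] = next_value
--         accum[pos] = accum[pos - 1] + next_value
--
--     # return last value
--     ret = count[N - 1]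
--     return ret % MOD
-- ===== SOURCE B (Python) =====
-- def dp_with_accum(N, K, SS):
--     # forward "push" DP with a signed difference array instead of prefix-sum range queries
--     MOD = 998244353
--     diff = [0] * (N + 1)
--     run = 0
--     cur = 0
--     for pos in range(N):
--         run = (run + diff[pos]) % MOD
--         cur = 1 if pos == 0 else run
--         for left, right in SS:
--             lo = pos + left
--             if pos < lo <= N - 1:
--                 diff[lo] += cur
--             hi1 = pos + right + 1
--             if pos < hi1 <= N - 1:
--                 diff[hi1] -= cur
--     return cur
-- ===== Notes on version B (the rewrite author's own statement) =====
-- stated objective: alternative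
-- what changed: A's backward pull-DP with a prefix-sum array queried per position is replaced by a forward push-DP over a signed difference array (imos trick): each computed count is range-added to the future window it feeds, and a single running prefix of the difference array yields each new count.
-- outside the precondition, e.g. on dp_with_accum(3, 0, [(14, 3)]): A returns 2, B returns 0; on dp_with_accum(4, 0, [(1, 14)]): A returns 0, B returns 4
import Mathlib
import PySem

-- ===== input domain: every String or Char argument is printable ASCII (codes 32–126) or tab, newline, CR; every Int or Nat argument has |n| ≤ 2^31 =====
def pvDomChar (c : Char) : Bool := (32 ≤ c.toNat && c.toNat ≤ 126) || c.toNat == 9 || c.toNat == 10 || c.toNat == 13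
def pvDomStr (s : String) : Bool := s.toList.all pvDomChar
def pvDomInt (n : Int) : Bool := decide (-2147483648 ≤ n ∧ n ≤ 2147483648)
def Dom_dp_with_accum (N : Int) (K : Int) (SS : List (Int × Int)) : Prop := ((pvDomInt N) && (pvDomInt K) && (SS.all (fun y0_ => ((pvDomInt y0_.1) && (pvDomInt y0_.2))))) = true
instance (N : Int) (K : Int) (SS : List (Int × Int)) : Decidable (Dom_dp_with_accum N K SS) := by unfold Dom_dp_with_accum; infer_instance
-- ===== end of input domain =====

-- B replaces A's backward prefix-sum range queries by a forward signed difference-array ("imos") push DP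
-- of the same cost (objective: alternative; the equivalence is about the return value, neither mutates its arguments).

-- ===== PORT A =====
-- A-side helper: the body of A's 'for pos in range(1, N)' loop (count, accum) -> (count, accum)
def bodyA (SS : List (Int × Int)) (st : List Int × List Int) (pos : Int) : List Int × List Int :=
  -- next_value = 0; for left, right in SS: next_value += accum[pos-left] - accum[pos-right-1]; next_value %= MOD
  let next_value := SS.foldl (fun nv lr =>
      PySem.Int.mod (nv + (PySem.List.pyGetD st.2 (pos - lr.1) 0 -
                           PySem.List.pyGetD st.2 (pos - lr.2 - 1) 0)) 998244353) 0
  -- count[pos] = next_value; accum[pos] = accum[pos-1] + next_value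
  (PySem.List.pySetD st.1 pos next_value,
   PySem.List.pySetD st.2 pos (PySem.List.pyGetD st.2 (pos - 1) 0 + next_value))

def dp_with_accum (N : Int) (K : Int) (SS : List (Int × Int)) : Int :=
  -- count = [0]*(N+10); accum = [0]*(N+10); accum[0] = count[0] = 1
  let count := PySem.List.pySetD (List.replicate (N + 10).toNat 0) 0 1
  let accum := PySem.List.pySetD (List.replicate (N + 10).toNat 0) 0 1
  let st := (PySem.List.pyRange 1 N 1).foldl (bodyA SS) (count, accum)
  -- return count[N-1] % MOD
  PySem.Int.mod (PySem.List.pyGetD st.1 (N - 1) 0) 998244353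

-- ===== PORT B =====
-- B-side helper: one (left, right) pair of B's inner loop: the two clipped difference-array writes
def pushPairB (N : Int) (pos : Int) (cur : Int) (d : List Int) (lr : Int × Int) : List Int :=
  let lo := pos + lr.1
  let d1 := if pos < lo ∧ lo ≤ N - 1 then
      PySem.List.pySetD d lo (PySem.List.pyGetD d lo 0 + cur) else d
  let hi1 := pos + lr.2 + 1
  if pos < hi1 ∧ hi1 ≤ N - 1 then
      PySem.List.pySetD d1 hi1 (PySem.List.pyGetD d1 hi1 0 - cur) else d1

-- B-side helper: the body of B's 'for pos in range(N)' loop over (diff, run, cur)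
def bodyB (N : Int) (SS : List (Int × Int)) (st : List Int × Int × Int) (pos : Int) : List Int × Int × Int :=
  let run := PySem.Int.mod (st.2.1 + PySem.List.pyGetD st.1 pos 0) 998244353
  let cur := if pos = 0 then 1 else run
  (SS.foldl (pushPairB N pos cur) st.1, run, cur)

def dp_with_accum_alt (N : Int) (K : Int) (SS : List (Int × Int)) : Int :=
  ((PySem.List.pyRange 0 N 1).foldl (bodyB N SS) (List.replicate (N + 1).toNat 0, 0, 0)).2.2

-- ===== PRECONDITION & SPEC =====
-- Pre_ excludes the inputs where A raises IndexError (N ≤ -5, or a window bound pushing an index off both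
-- ends of the padded arrays) and the two boundary values left = N+11 / right = N+10, where A still returns
-- but its value comes from a negative index wrapping around onto real prefix sums — an accident of A's
-- padded-array implementation (both behaviours there are artefacts nobody would specify).
def Pre_dp_with_accum (N : Int) (K : Int) (SS : List (Int × Int)) : Prop :=
  -4 ≤ N ∧ (2 ≤ N → ∀ lr ∈ SS, -10 ≤ lr.1 ∧ lr.1 ≤ N + 10 ∧ -11 ≤ lr.2 ∧ lr.2 ≤ N + 9)
instance (N : Int) (K : Int) (SS : List (Int × Int)) : Decidable (Pre_dp_with_accum N K SS) := by
  unfold Pre_dp_with_accum; infer_instance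

def pvWitness_dp_with_accum : Int × Int × (List (Int × Int)) := (4, 0, [(1, 2)])

def Spec_dp_with_accum (N : Int) (K : Int) (SS : List (Int × Int)) (out : Int) : Prop := out = dp_with_accum_alt N K SS
instance (N : Int) (K : Int) (SS : List (Int × Int)) (out : Int) : Decidable (Spec_dp_with_accum N K SS out) := by unfold Spec_dp_with_accum; infer_instance

-- ===== CLAIM (what is proved, stated in full; the proofs are below) =====
def Claim_equal_dp_with_accum : Prop := ∀ (N : Int) (K : Int) (SS : List (Int × Int)), Dom_dp_with_accum N K SS → Pre_dp_with_accum N K SS → Spec_dp_with_accum N K SS (dp_with_accum N K SS)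

-- ===== LEMMAS AND PROOFS =====

-- The common mathematical reference: the count sequence cc SS p, with accOf its exact prefix sums
-- and wv the "value A's zero-padded array yields for a read at offset e while computing position p".
def accOf (cs : List Int) (e : Int) : Int := if e < 0 then 0 else (cs.take (e.toNat + 1)).sum

def wv (cs : List Int) (p e : Int) : Int := if 0 ≤ e ∧ e ≤ p - 1 then accOf cs e else 0

def ccStep (SS : List (Int × Int)) (cs : List Int) (p : Int) : Int :=
  SS.foldl (fun nv lr => PySem.Int.mod (nv + (wv cs p (p - lr.1) - wv cs p (p - lr.2 - 1))) 998244353) 0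

def counts (SS : List (Int × Int)) : Nat → List Int
  | 0 => [1]
  | n + 1 => counts SS n ++ [ccStep SS (counts SS n) ((n : Int) + 1)]

def cc (SS : List (Int × Int)) (p : Nat) : Int := (counts SS p).getD p 0

theorem counts_length (SS : List (Int × Int)) (m : Nat) : (counts SS m).length = m + 1 := by
  induction m with
  | zero => rfl
  | succ n ih => simp [counts, ih]

theorem cc_zero (SS : List (Int × Int)) : cc SS 0 = 1 := rfl

theorem counts_succ (SS : List (Int × Int)) (n : Nat) :
    counts SS (n + 1) = counts SS n ++ [ccStep SS (counts SS n) ((n : Int) + 1)] := rfl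

theorem cc_succ (SS : List (Int × Int)) (n : Nat) :
    cc SS (n + 1) = ccStep SS (counts SS n) ((n : Int) + 1) := by
  unfold cc
  rw [counts_succ, List.getD_eq_getElem?_getD, List.getElem?_append_right (by simp [counts_length])]
  simp [counts_length]

theorem counts_take (SS : List (Int × Int)) {n m : Nat} (h : n ≤ m) :
    (counts SS m).take (n + 1) = counts SS n := by
  induction m with
  | zero => have : n = 0 := by omega
            subst this; rfl
  | succ k ih =>
    rcases Nat.lt_or_ge n (k + 1) with h' | h'
    · rw [counts_succ, List.take_append_of_le_length (by simp [counts_length]; omega)]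
      exact ih (by omega)
    · have h0 : n = k + 1 := by omega
      subst h0
      exact List.take_of_length_le (by simp [counts_length])

theorem counts_eq_map (SS : List (Int × Int)) (m : Nat) :
    counts SS m = (List.range (m + 1)).map (cc SS) := by
  induction m with
  | zero => simp [counts, cc_zero]
  | succ n ih =>
    rw [counts_succ, ← cc_succ, ih]
    simp [List.range_succ]

theorem counts_getElem (SS : List (Int × Int)) {m p : Nat} (h : p ≤ m)
    (hlt : p < (counts SS m).length) : (counts SS m)[p] = cc SS p := by
  simp only [counts_eq_map SS m]
  rw [List.getElem_map, List.getElem_range]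

theorem accOf_counts (SS : List (Int × Int)) {m : Nat} {e : Int} (h0 : 0 ≤ e) (h1 : e ≤ (m : Int)) :
    accOf (counts SS m) e = ((List.range (e.toNat + 1)).map (cc SS)).sum := by
  unfold accOf
  rw [if_neg (by omega), counts_take SS (show e.toNat ≤ m by omega), counts_eq_map]

-- ---------- generic sum lemmas ----------
theorem listsum_swap {α : Type} (L : List α) (n : Nat) (f : Nat → α → Int) :
    ((List.range n).map (fun i => (L.map (f i)).sum)).sum
      = (L.map (fun x => ((List.range n).map (fun i => f i x)).sum)).sum := by
  induction L with
  | nil => simp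
  | cons x t ih =>
    have h1 : ((List.range n).map (fun i => ((List.map (f i) (x :: t)).sum)))
        = ((List.range n).map (fun i => f i x + (List.map (f i) t).sum)) := by simp
    rw [h1, PySem.List.sum_map_add_int, ih]
    simp

theorem sum_ite_indicator (n : Nat) (x v : Int) (P : Prop) [Decidable P] :
    ((List.range n).map (fun (i : Nat) => if P ∧ (i : Int) = x then v else 0)).sum
      = if P ∧ 0 ≤ x ∧ x < (n : Int) then v else 0 := by
  induction n with
  | zero =>
    simp only [List.range_zero, List.map_nil, List.sum_nil, Nat.cast_zero]
    rw [if_neg]; rintro ⟨_, h1, h2⟩; omega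
  | succ k ih =>
    rw [List.range_succ, List.map_append, List.sum_append, ih]
    simp only [List.map_cons, List.map_nil, List.sum_cons, List.sum_nil, add_zero]
    by_cases hP : P
    · simp only [hP, true_and]
      push_cast
      by_cases hk : (k : Int) = x
      · rw [if_pos hk, if_neg (by omega), if_pos (by omega), zero_add]
      · rw [if_neg hk, add_zero]
        by_cases hx : 0 ≤ x ∧ x < (k : Int)
        · rw [if_pos hx, if_pos ⟨hx.1, by omega⟩]
        · rw [if_neg hx, if_neg ?_]
          rintro ⟨a, b⟩
          exact hx ⟨a, by omega⟩
    · simp [hP]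

theorem sum_indicator_le (q e : Nat) (g : Nat → Int) (h : e < q) :
    ((List.range q).map (fun (j : Nat) => if (j : Int) ≤ (e : Int) then g j else 0)).sum
      = ((List.range (e + 1)).map g).sum := by
  have hq : q = (e + 1) + (q - e - 1) := by omega
  rw [hq, List.range_add, List.map_append, List.sum_append, List.map_map]
  have h1 : ∀ j ∈ List.range (e + 1), (fun (j : Nat) => if (j : Int) ≤ (e : Int) then g j else 0) j = g j := by
    intro j hj; simp only [List.mem_range] at hj
    have : (j : Int) ≤ (e : Int) := by omega
    simp [this]
  have h2 : ((List.range (q - e - 1)).map ((fun (j : Nat) => if (j : Int) ≤ (e : Int) then g j else 0) ∘ (fun x => (e+1) + x))).sum = 0 := by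
    apply List.sum_eq_zero
    intro x hx
    simp only [List.mem_map] at hx
    obtain ⟨a, _, rfl⟩ := hx
    simp only [Function.comp_apply]
    rw [if_neg (by push_cast; omega)]
  rw [List.map_congr_left h1, h2, add_zero]

theorem sum_map_neg_int {α : Type} (L : List α) (f : α → Int) :
    (L.map (fun x => -(f x))).sum = -((L.map f).sum) := by
  induction L with
  | nil => simp
  | cons x t ih => simp [ih]; ring

-- ---------- modular arithmetic ----------
theorem modM_zero : PySem.Int.mod 0 998244353 = 0 := by
  rw [PySem.Int.mod_eq_emod_of_pos (by norm_num)]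
  simp

theorem modM_add_left (a b : Int) :
    PySem.Int.mod (PySem.Int.mod a 998244353 + b) 998244353 = PySem.Int.mod (a + b) 998244353 := by
  rw [PySem.Int.mod_eq_emod_of_pos (by norm_num), PySem.Int.mod_eq_emod_of_pos (by norm_num),
      PySem.Int.mod_eq_emod_of_pos (by norm_num), Int.emod_add_emod]

theorem modM_idem (a : Int) :
    PySem.Int.mod (PySem.Int.mod a 998244353) 998244353 = PySem.Int.mod a 998244353 := by
  have := modM_add_left a 0
  simpa using this

theorem foldl_modsum {α : Type} (f : α → Int) : ∀ (L : List α) (a : Int),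
    L.foldl (fun nv x => PySem.Int.mod (nv + f x) 998244353) (PySem.Int.mod a 998244353)
      = if L = [] then PySem.Int.mod a 998244353 else PySem.Int.mod (a + (L.map f).sum) 998244353 := by
  intro L
  induction L with
  | nil => intro a; simp
  | cons x t ih =>
    intro a
    simp only [List.foldl_cons, List.map_cons, List.sum_cons, reduceCtorEq, if_false]
    rw [modM_add_left, ih (a + f x)]
    by_cases ht : t = []
    · simp [ht]
    · simp only [ht, if_false]
      rw [add_assoc]

theorem ccStep_eq_mod (SS : List (Int × Int)) (cs : List Int) (p : Int) :
    ccStep SS cs p = PySem.Int.mod ((SS.map (fun lr => wv cs p (p - lr.1) - wv cs p (p - lr.2 - 1))).sum) 998244353 := by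
  unfold ccStep
  rcases SS with _ | ⟨x, t⟩
  · simp [modM_zero]
  · have h0 : (0 : Int) = PySem.Int.mod 0 998244353 := modM_zero.symm
    rw [h0, foldl_modsum]
    simp

theorem modM_cc (SS : List (Int × Int)) (p : Nat) :
    PySem.Int.mod (cc SS p) 998244353 = cc SS p := by
  cases p with
  | zero =>
    rw [cc_zero, PySem.Int.mod_eq_emod_of_pos (by norm_num)]
    decide
  | succ n =>
    rw [cc_succ, ccStep_eq_mod, modM_idem]

-- ---------- A side ----------
def countArrA (SS : List (Int × Int)) (N : Int) (m : Nat) : List Int :=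
  counts SS m ++ List.replicate ((N + 10).toNat - (m + 1)) 0

def accArrA (SS : List (Int × Int)) (N : Int) (m : Nat) : List Int :=
  (List.range (m + 1)).map (fun (i : Nat) => accOf (counts SS m) (i : Int)) ++ List.replicate ((N + 10).toNat - (m + 1)) 0

theorem read_accA (SS : List (Int × Int)) {N : Int} {m : Nat} (hN : 1 ≤ N) (hm : (m : Int) ≤ N - 1)
    {e : Int} (hlow : (m : Int) - N - 9 ≤ e) (hhigh : e ≤ N + 9) :
    PySem.List.pyGetD (accArrA SS N m) e 0 = wv (counts SS m) ((m : Int) + 1) e := by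
  have hmlen : m + 1 ≤ (N + 10).toNat := by omega
  have hlen : (accArrA SS N m).length = (N + 10).toNat := by
    simp [accArrA, counts_length]
    omega
  rcases Int.lt_or_le e 0 with he | he
  · -- negative index: Python wraps around, landing in the zero padding
    have hk0 : 0 < (-e).toNat := by omega
    have hk1 : (-e).toNat ≤ (accArrA SS N m).length := by rw [hlen]; omega
    have hke : e = -(((-e).toNat : Int)) := by omega
    rw [hke, PySem.List.pyGetD_neg_natCast _ _ _ hk0 hk1]
    have hidx : m + 1 ≤ (accArrA SS N m).length - (-e).toNat := by rw [hlen]; omega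
    unfold accArrA
    rw [List.getElem_append_right (by simp [counts_length]; omega)]
    rw [List.getElem_replicate]
    unfold wv
    rw [if_neg (by omega)]
  · rcases Int.lt_or_le e ((m : Int) + 1) with hlt | hge
    · -- 0 ≤ e ≤ m: a real prefix-sum entry
      rw [PySem.List.pyGetD_eq_getElem _ _ he (by rw [hlen]; omega)]
      unfold accArrA
      rw [List.getElem_append_left (by simp; omega), List.getElem_map, List.getElem_range]
      unfold wv
      rw [if_pos ⟨he, by omega⟩]
      congr 1
      omega
    · -- m+1 ≤ e ≤ N+9: still inside the zero padding
      rw [PySem.List.pyGetD_eq_getElem _ _ he (by rw [hlen]; omega)]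
      unfold accArrA
      rw [List.getElem_append_right (by simp [counts_length]; omega), List.getElem_replicate]
      unfold wv
      rw [if_neg (by omega)]

theorem set_padded (xs : List Int) (n t : Nat) (v : Int) (hn : n = xs.length) (ht : 1 ≤ t) :
    (xs ++ List.replicate t (0 : Int)).set n v = xs ++ v :: List.replicate (t - 1) 0 := by
  subst hn
  rw [List.set_append_right _ _ (le_refl _), Nat.sub_self]
  obtain ⟨u, rfl⟩ : ∃ u, t = u + 1 := ⟨t - 1, by omega⟩
  simp [List.replicate_succ]

theorem A_loop (SS : List (Int × Int)) {N : Int} (hN : 1 ≤ N)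
    (hSS : ∀ lr ∈ SS, -10 ≤ lr.1 ∧ lr.1 ≤ N + 10 ∧ -11 ≤ lr.2 ∧ lr.2 ≤ N + 9) :
    ∀ m : Nat, (m : Int) ≤ N - 1 →
    (PySem.List.pyRange 1 ((m : Int) + 1) 1).foldl (bodyA SS) (countArrA SS N 0, accArrA SS N 0)
      = (countArrA SS N m, accArrA SS N m) := by
  intro m
  induction m with
  | zero =>
    intro _
    rw [show ((0 : Nat) : Int) + 1 = 1 by norm_num, PySem.List.pyRange_one_eq_nil (le_refl 1)]
    rfl
  | succ m ih =>
    intro hm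
    have hm' : (m : Int) ≤ N - 1 := by push_cast at hm ⊢; omega
    have hm1 : ((m : Int) + 1) ≤ N - 1 := by push_cast at hm; omega
    rw [show (((m + 1 : Nat)) : Int) + 1 = ((m : Int) + 1) + 1 by push_cast; ring,
        PySem.List.pyRange_one_succ_right (by omega), List.foldl_append, ih hm',
        List.foldl_cons, List.foldl_nil]
    simp only [bodyA]
    have hnv : (SS.foldl (fun nv lr =>
        PySem.Int.mod (nv + (PySem.List.pyGetD (accArrA SS N m) (((m : Int) + 1) - lr.1) 0 -
          PySem.List.pyGetD (accArrA SS N m) (((m : Int) + 1) - lr.2 - 1) 0)) 998244353) 0)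
        = ccStep SS (counts SS m) ((m : Int) + 1) := by
      unfold ccStep
      apply PySem.List.foldl_congr_mem
      intro acc lr hlr
      obtain ⟨hl1, hl2, hr1, hr2⟩ := hSS lr hlr
      rw [read_accA SS hN hm' (by omega) (by omega), read_accA SS hN hm' (by omega) (by omega)]
    rw [hnv]
    have hrd : PySem.List.pyGetD (accArrA SS N m) (((m : Int) + 1) - 1) 0 = accOf (counts SS m) (m : Int) := by
      rw [show ((m : Int) + 1) - 1 = (m : Int) by ring,
          read_accA SS hN hm' (by omega) (by omega)]
      unfold wv
      rw [if_pos ⟨by omega, by omega⟩]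
    rw [hrd]
    have htn : ((m : Int) + 1).toNat = m + 1 := by omega
    have hts : 1 ≤ (N + 10).toNat - (m + 1) := by omega
    simp only [Prod.mk.injEq]
    constructor
    · -- count side
      rw [PySem.List.pySetD_of_nonneg _ _ (by omega), htn]
      unfold countArrA
      rw [set_padded _ _ _ _ (counts_length SS m).symm hts, counts_succ, List.append_assoc,
          List.singleton_append,
          show (N + 10).toNat - (m + 1) - 1 = (N + 10).toNat - (m + 1 + 1) from by omega]
    · -- accum side
      rw [PySem.List.pySetD_of_nonneg _ _ (by omega), htn]
      unfold accArrA
      rw [set_padded _ _ _ _ (by simp) hts]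
      have hmap : (List.range (m + 1 + 1)).map (fun (i : Nat) => accOf (counts SS (m + 1)) (i : Int))
          = (List.range (m + 1)).map (fun (i : Nat) => accOf (counts SS m) (i : Int))
            ++ [accOf (counts SS m) (m : Int) + ccStep SS (counts SS m) ((m : Int) + 1)] := by
        rw [List.range_succ, List.map_append, List.map_cons, List.map_nil]
        congr 1
        · apply List.map_congr_left
          intro i hi
          simp only [List.mem_range] at hi
          rw [accOf_counts SS (by omega) (by push_cast; omega),
              accOf_counts SS (by omega) (by push_cast; omega)]
        · rw [← cc_succ,
              accOf_counts SS (by omega) (by push_cast; omega),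
              accOf_counts SS (by omega) (by push_cast; omega)]
          simp only [Int.toNat_natCast]
          rw [List.range_succ, List.map_append, List.sum_append]
          simp
      rw [hmap, List.append_assoc, List.singleton_append,
          show (N + 10).toNat - (m + 1) - 1 = (N + 10).toNat - (m + 1 + 1) from by omega]

theorem A_result (SS : List (Int × Int)) {N : Int} (K : Int) (hN : 1 ≤ N)
    (hSS : ∀ lr ∈ SS, -10 ≤ lr.1 ∧ lr.1 ≤ N + 10 ∧ -11 ≤ lr.2 ∧ lr.2 ≤ N + 9) :
    dp_with_accum N K SS = PySem.Int.mod (cc SS (N - 1).toNat) 998244353 := by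
  unfold dp_with_accum
  have hinit_c : PySem.List.pySetD (List.replicate (N + 10).toNat 0) 0 1 = countArrA SS N 0 := by
    rw [PySem.List.pySetD_of_nonneg _ _ (le_refl 0)]
    unfold countArrA
    obtain ⟨u, hu⟩ : ∃ u, (N + 10).toNat = u + 1 := ⟨(N + 10).toNat - 1, by omega⟩
    rw [hu, List.replicate_succ]
    simp [counts]
  have hca : countArrA SS N 0 = accArrA SS N 0 := rfl
  simp only [hinit_c]
  rw [show PySem.List.pyRange 1 N 1 = PySem.List.pyRange 1 ((((N - 1).toNat : Nat) : Int) + 1) 1 by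
        congr 1; omega]
  rw [show ((countArrA SS N 0, countArrA SS N 0) : List Int × List Int)
        = (countArrA SS N 0, accArrA SS N 0) from by rw [← hca]]
  rw [A_loop SS hN hSS (N - 1).toNat (by omega)]
  have hlenc : (countArrA SS N (N - 1).toNat).length = (N + 10).toNat := by
    simp [countArrA, counts_length]
    omega
  rw [PySem.List.pyGetD_eq_getElem _ _ (by omega) (by rw [hlenc]; omega)]
  unfold countArrA
  rw [List.getElem_append_left (by simp [counts_length])]
  rw [counts_getElem SS (le_refl _) (by simp [counts_length])]

-- ---------- B side ----------
def pushA (SS : List (Int × Int)) (N : Int) (j i : Nat) : Int :=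
  (SS.map (fun lr =>
    (if ((j : Int) < (j : Int) + lr.1 ∧ (j : Int) + lr.1 ≤ N - 1) ∧ (i : Int) = (j : Int) + lr.1 then cc SS j else 0)
  + (if ((j : Int) < (j : Int) + lr.2 + 1 ∧ (j : Int) + lr.2 + 1 ≤ N - 1) ∧ (i : Int) = (j : Int) + lr.2 + 1 then -(cc SS j) else 0))).sum

def diffVal (SS : List (Int × Int)) (N : Int) (p i : Nat) : Int :=
  ((List.range p).map (fun j => pushA SS N j i)).sum

def diffArrB (SS : List (Int × Int)) (N : Int) (p : Nat) : List Int :=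
  (List.range (N + 1).toNat).map (fun i => diffVal SS N p i)

def runB (SS : List (Int × Int)) (N : Int) (p : Nat) : Int :=
  PySem.Int.mod (((List.range p).map (fun i => diffVal SS N i i)).sum) 998244353

theorem pushA_ge (SS : List (Int × Int)) (N : Int) {j i : Nat} (h : i ≤ j) : pushA SS N j i = 0 := by
  apply List.sum_eq_zero
  intro x hx
  simp only [List.mem_map] at hx
  obtain ⟨lr, _, rfl⟩ := hx
  have c1 : ¬ (((j : Int) < (j : Int) + lr.1 ∧ (j : Int) + lr.1 ≤ N - 1) ∧ (i : Int) = (j : Int) + lr.1) := by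
    rintro ⟨⟨a, b⟩, c⟩; omega
  have c2 : ¬ (((j : Int) < (j : Int) + lr.2 + 1 ∧ (j : Int) + lr.2 + 1 ≤ N - 1) ∧ (i : Int) = (j : Int) + lr.2 + 1) := by
    rintro ⟨⟨a, b⟩, c⟩; omega
  rw [if_neg c1, if_neg c2, add_zero]

theorem diffVal_eq_of_le (SS : List (Int × Int)) (N : Int) {p i : Nat} (h : i ≤ p) :
    diffVal SS N p i = diffVal SS N i i := by
  unfold diffVal
  have hp : p = i + (p - i) := by omega
  rw [hp, List.range_add, List.map_append, List.sum_append, List.map_map]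
  have : ((List.range (p - i)).map ((fun j => pushA SS N j i) ∘ (fun x => i + x))).sum = 0 := by
    apply List.sum_eq_zero
    intro x hx
    simp only [List.mem_map] at hx
    obtain ⟨a, _, rfl⟩ := hx
    simp only [Function.comp_apply]
    exact pushA_ge SS N (by omega)
  rw [this, add_zero]

theorem getD_map_range (n : Nat) (g : Nat → Int) {q : Int} (h0 : 0 ≤ q) (h1 : q < (n : Int)) :
    PySem.List.pyGetD ((List.range n).map g) q 0 = g q.toNat := by
  rw [PySem.List.pyGetD_eq_getElem _ _ h0 (by simp; omega), List.getElem_map, List.getElem_range]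

theorem setMapRange (n : Nat) (g : Nat → Int) {q : Int} (v : Int) (h0 : 0 ≤ q) (h1 : q < (n : Int)) :
    PySem.List.pySetD ((List.range n).map g) q v
      = (List.range n).map (fun (i : Nat) => if (i : Int) = q then v else g i) := by
  rw [PySem.List.pySetD_of_nonneg _ _ h0]
  apply List.ext_getElem (by simp)
  intro i hi1 hi2
  simp only [List.getElem_set, List.getElem_map, List.getElem_range]
  split_ifs <;> first | rfl | (exfalso; omega)

theorem write_map {N : Int} (hN0 : 0 ≤ N) (g : Nat → Int) (x amt : Int) (P : Prop) [Decidable P]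
    (hP : P → 0 < x ∧ x ≤ N - 1) :
    (if P then PySem.List.pySetD ((List.range (N + 1).toNat).map g) x
            (PySem.List.pyGetD ((List.range (N + 1).toNat).map g) x 0 + amt)
          else (List.range (N + 1).toNat).map g)
      = (List.range (N + 1).toNat).map (fun (i : Nat) => g i + if P ∧ (i : Int) = x then amt else 0) := by
  by_cases hp : P
  · obtain ⟨hx0, hx1⟩ := hP hp
    rw [if_pos hp, getD_map_range _ _ (by omega) (by omega), setMapRange _ _ _ (by omega) (by omega)]
    apply List.map_congr_left
    intro i hi
    simp only [List.mem_range] at hi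
    by_cases hix : (i : Int) = x
    · rw [if_pos hix, if_pos ⟨hp, hix⟩]
      have : x.toNat = i := by omega
      rw [this]
    · rw [if_neg hix, if_neg (by rintro ⟨_, h⟩; exact hix h), add_zero]
  · rw [if_neg hp]
    apply List.map_congr_left
    intro i _
    rw [if_neg (by rintro ⟨h, _⟩; exact hp h), add_zero]

theorem pushPair_map {N : Int} (pos : Nat) (cur : Int) (g : Nat → Int) (lr : Int × Int)
    (hpos : (pos : Int) < N) :
    pushPairB N (pos : Int) cur ((List.range (N + 1).toNat).map g) lr
      = (List.range (N + 1).toNat).map (fun (i : Nat) =>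
          g i + (if ((pos : Int) < (pos : Int) + lr.1 ∧ (pos : Int) + lr.1 ≤ N - 1) ∧ (i : Int) = (pos : Int) + lr.1 then cur else 0)
              + (if ((pos : Int) < (pos : Int) + lr.2 + 1 ∧ (pos : Int) + lr.2 + 1 ≤ N - 1) ∧ (i : Int) = (pos : Int) + lr.2 + 1 then -cur else 0)) := by
  have hN0 : (0 : Int) ≤ N := by omega
  simp only [pushPairB, sub_eq_add_neg]
  rw [write_map hN0 g ((pos : Int) + lr.1) cur _ (by intro h; omega)]
  rw [write_map hN0 _ ((pos : Int) + lr.2 + 1) (-cur) _ (by intro h; omega)]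

theorem pushFold {N : Int} (pos : Nat) (cur : Int) (hpos : (pos : Int) < N) :
    ∀ (L : List (Int × Int)) (g : Nat → Int),
    L.foldl (pushPairB N (pos : Int) cur) ((List.range (N + 1).toNat).map g)
      = (List.range (N + 1).toNat).map (fun (i : Nat) => g i +
          (L.map (fun lr =>
            (if ((pos : Int) < (pos : Int) + lr.1 ∧ (pos : Int) + lr.1 ≤ N - 1) ∧ (i : Int) = (pos : Int) + lr.1 then cur else 0)
          + (if ((pos : Int) < (pos : Int) + lr.2 + 1 ∧ (pos : Int) + lr.2 + 1 ≤ N - 1) ∧ (i : Int) = (pos : Int) + lr.2 + 1 then -cur else 0))).sum)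
  | [], g => by simp
  | lr :: L, g => by
    rw [List.foldl_cons, pushPair_map pos cur g lr hpos, pushFold pos cur hpos L _]
    apply List.map_congr_left
    intro i _
    simp only [List.map_cons, List.sum_cons]
    ring

theorem wv_sum (SS : List (Int × Int)) {N : Int} (q : Nat) (l : Int) (_hp : ((q : Int) + 1) ≤ N - 1) :
    ((List.range (q + 1 + 1)).map (fun (j : Nat) =>
        if ((j : Int) < (j : Int) + l ∧ (j : Int) + l ≤ N - 1) ∧ 0 ≤ (j : Int) + l ∧ (j : Int) + l < ((q + 1 + 1 : Nat) : Int) then cc SS j else 0)).sum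
      = wv (counts SS q) ((q : Int) + 1) (((q : Int) + 1) - l) := by
  unfold wv
  by_cases hc : 0 ≤ ((q : Int) + 1) - l ∧ ((q : Int) + 1) - l ≤ ((q : Int) + 1) - 1
  · rw [if_pos hc, accOf_counts SS (by omega) (by omega)]
    rw [← sum_indicator_le (q + 1 + 1) ((((q : Int) + 1) - l).toNat) (cc SS) (by omega)]
    apply congrArg List.sum
    apply List.map_congr_left
    intro j hj
    simp only [List.mem_range] at hj
    have hcast : ((((((q : Int) + 1) - l).toNat) : Nat) : Int) = ((q : Int) + 1) - l := by omega
    split_ifs <;> first | rfl | (exfalso; omega)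
  · rw [if_neg hc]
    apply List.sum_eq_zero
    intro x hx
    simp only [List.mem_map] at hx
    obtain ⟨j, hj, rfl⟩ := hx
    rw [if_neg]
    rintro ⟨⟨h1, h2⟩, h3, h4⟩
    simp only [List.mem_range] at hj
    push_cast at h4
    omega

-- the bridge: B's running prefix of the difference array reproduces the count sequence
theorem bridge (SS : List (Int × Int)) {N : Int} {p : Nat} (h1 : 1 ≤ p) (hp : (p : Int) ≤ N - 1) :
    runB SS N (p + 1) = cc SS p := by
  obtain ⟨q, rfl⟩ : ∃ q, p = q + 1 := ⟨p - 1, by omega⟩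
  have hq1 : ((q : Int) + 1) ≤ N - 1 := by push_cast at hp; omega
  rw [cc_succ, ccStep_eq_mod]
  unfold runB
  congr 1
  have hA : ∀ i ∈ List.range (q + 1 + 1), diffVal SS N i i = diffVal SS N (q + 1 + 1) i := by
    intro i hi
    simp only [List.mem_range] at hi
    exact (diffVal_eq_of_le SS N (by omega)).symm
  rw [List.map_congr_left hA]
  unfold diffVal
  rw [listsum_swap (List.range (q + 1 + 1)) (q + 1 + 1) (fun i j => pushA SS N j i)]
  have hB : ∀ j ∈ List.range (q + 1 + 1),
      ((List.range (q + 1 + 1)).map (fun (i : Nat) => pushA SS N j i)).sum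
        = (SS.map (fun lr =>
            (if ((j : Int) < (j : Int) + lr.1 ∧ (j : Int) + lr.1 ≤ N - 1) ∧ 0 ≤ (j : Int) + lr.1 ∧ (j : Int) + lr.1 < ((q + 1 + 1 : Nat) : Int) then cc SS j else 0)
          + (if ((j : Int) < (j : Int) + lr.2 + 1 ∧ (j : Int) + lr.2 + 1 ≤ N - 1) ∧ 0 ≤ (j : Int) + lr.2 + 1 ∧ (j : Int) + lr.2 + 1 < ((q + 1 + 1 : Nat) : Int) then -(cc SS j) else 0))).sum := by
    intro j _
    unfold pushA
    rw [listsum_swap SS (q + 1 + 1) (fun i lr =>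
        (if ((j : Int) < (j : Int) + lr.1 ∧ (j : Int) + lr.1 ≤ N - 1) ∧ (i : Int) = (j : Int) + lr.1 then cc SS j else 0)
      + (if ((j : Int) < (j : Int) + lr.2 + 1 ∧ (j : Int) + lr.2 + 1 ≤ N - 1) ∧ (i : Int) = (j : Int) + lr.2 + 1 then -(cc SS j) else 0))]
    apply congrArg List.sum
    apply List.map_congr_left
    intro lr _
    rw [PySem.List.sum_map_add_int, sum_ite_indicator, sum_ite_indicator]
  rw [List.map_congr_left hB,
      listsum_swap SS (q + 1 + 1) (fun j lr =>
        (if ((j : Int) < (j : Int) + lr.1 ∧ (j : Int) + lr.1 ≤ N - 1) ∧ 0 ≤ (j : Int) + lr.1 ∧ (j : Int) + lr.1 < ((q + 1 + 1 : Nat) : Int) then cc SS j else 0)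
      + (if ((j : Int) < (j : Int) + lr.2 + 1 ∧ (j : Int) + lr.2 + 1 ≤ N - 1) ∧ 0 ≤ (j : Int) + lr.2 + 1 ∧ (j : Int) + lr.2 + 1 < ((q + 1 + 1 : Nat) : Int) then -(cc SS j) else 0))]
  apply congrArg List.sum
  apply List.map_congr_left
  intro lr _
  rw [PySem.List.sum_map_add_int]
  have hT1 := wv_sum SS q lr.1 hq1
  have hT2 : ((List.range (q + 1 + 1)).map (fun (j : Nat) =>
      if ((j : Int) < (j : Int) + lr.2 + 1 ∧ (j : Int) + lr.2 + 1 ≤ N - 1) ∧ 0 ≤ (j : Int) + lr.2 + 1 ∧ (j : Int) + lr.2 + 1 < ((q + 1 + 1 : Nat) : Int) then -(cc SS j) else 0)).sum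
      = -(wv (counts SS q) ((q : Int) + 1) (((q : Int) + 1) - lr.2 - 1)) := by
    have hstep : ∀ j : Nat, ((if ((j : Int) < (j : Int) + lr.2 + 1 ∧ (j : Int) + lr.2 + 1 ≤ N - 1) ∧ 0 ≤ (j : Int) + lr.2 + 1 ∧ (j : Int) + lr.2 + 1 < ((q + 1 + 1 : Nat) : Int) then -(cc SS j) else 0) : Int)
        = -(if ((j : Int) < (j : Int) + (lr.2 + 1) ∧ (j : Int) + (lr.2 + 1) ≤ N - 1) ∧ 0 ≤ (j : Int) + (lr.2 + 1) ∧ (j : Int) + (lr.2 + 1) < ((q + 1 + 1 : Nat) : Int) then cc SS j else 0) := by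
      intro j
      rw [show (j : Int) + (lr.2 + 1) = (j : Int) + lr.2 + 1 from by ring]
      split_ifs <;> simp
    rw [List.map_congr_left (fun j _ => hstep j), sum_map_neg_int, wv_sum SS q (lr.2 + 1) hq1]
    rw [show ((q : Int) + 1) - (lr.2 + 1) = ((q : Int) + 1) - lr.2 - 1 from by ring]
  rw [hT1, hT2]
  ring

theorem B_loop (SS : List (Int × Int)) {N : Int} (hN : 1 ≤ N) :
    ∀ p : Nat, (p : Int) ≤ N →
    (PySem.List.pyRange 0 (p : Int) 1).foldl (bodyB N SS) (List.replicate (N + 1).toNat 0, 0, 0)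
      = (diffArrB SS N p, runB SS N p, if p = 0 then 0 else cc SS (p - 1)) := by
  intro p
  induction p with
  | zero =>
    intro _
    rw [show ((0 : Nat) : Int) = 0 by norm_num, PySem.List.pyRange_one_eq_nil (le_refl 0)]
    simp only [List.foldl_nil]
    have h1 : diffArrB SS N 0 = List.replicate (N + 1).toNat 0 := by
      apply List.ext_getElem (by simp [diffArrB])
      intro i hi1 hi2
      simp [diffArrB, diffVal]
    have h2 : runB SS N 0 = 0 := by
      unfold runB
      simp [modM_zero]
    rw [h1, h2]
    simp
  | succ p ih =>
    intro hp
    have hp' : (p : Int) ≤ N := by push_cast at hp ⊢; omega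
    have hpN : (p : Int) < N := by push_cast at hp; omega
    rw [show (((p + 1 : Nat)) : Int) = (p : Int) + 1 by push_cast; ring,
        PySem.List.pyRange_one_succ_right (by omega), List.foldl_append, ih hp',
        List.foldl_cons, List.foldl_nil]
    simp only [bodyB]
    have hread : PySem.List.pyGetD (diffArrB SS N p) (p : Int) 0 = diffVal SS N p p := by
      unfold diffArrB
      rw [getD_map_range _ _ (by omega) (by omega)]
      simp
    have hrun : PySem.Int.mod (runB SS N p + PySem.List.pyGetD (diffArrB SS N p) (p : Int) 0) 998244353
        = runB SS N (p + 1) := by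
      rw [hread]
      unfold runB
      rw [modM_add_left]
      congr 1
      rw [List.range_succ]
      simp
    have hcur : (if (p : Int) = 0 then (1 : Int) else runB SS N (p + 1)) = cc SS p := by
      by_cases hp0 : p = 0
      · subst hp0
        norm_num [cc_zero]
      · rw [if_neg (by omega)]
        exact bridge SS (by omega) (by omega)
    rw [hrun, hcur]
    have hpush : SS.foldl (pushPairB N (p : Int) (cc SS p)) (diffArrB SS N p) = diffArrB SS N (p + 1) := by
      unfold diffArrB
      rw [pushFold p (cc SS p) hpN SS (fun i => diffVal SS N p i)]
      apply List.map_congr_left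
      intro i _
      show diffVal SS N p i + pushA SS N p i = diffVal SS N (p + 1) i
      unfold diffVal
      rw [List.range_succ, List.map_append, List.sum_append]
      simp
    rw [hpush]
    simp

theorem B_result (SS : List (Int × Int)) {N : Int} (K : Int) (hN : 1 ≤ N) :
    dp_with_accum_alt N K SS = cc SS (N - 1).toNat := by
  unfold dp_with_accum_alt
  rw [show PySem.List.pyRange 0 N 1 = PySem.List.pyRange 0 ((N.toNat : Nat) : Int) 1 by congr 1; omega]
  rw [B_loop SS hN N.toNat (by omega)]
  simp only []
  rw [if_neg (by omega)]
  congr 1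
  omega

-- ===== VERDICT (by name: the statement is the Claim_ definition above) =====
theorem dp_with_accum_spec : Claim_equal_dp_with_accum := by
  intro N K SS _ hPre
  obtain ⟨h4, hbd⟩ := hPre
  unfold Spec_dp_with_accum
  rcases Int.lt_or_le N 1 with hN | hN
  · -- -4 ≤ N ≤ 0: both programs return 0
    interval_cases N <;>
      · unfold dp_with_accum dp_with_accum_alt
        rw [PySem.List.pyRange_one_eq_nil (by norm_num), PySem.List.pyRange_one_eq_nil (by norm_num)]
        simp only [List.foldl_nil]
        decide
  · rcases Int.lt_or_le N 2 with h1 | h2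
    · -- N = 1: A's loop is empty, both return 1
      have hN1 : N = 1 := by omega
      subst hN1
      rw [B_result SS K (by norm_num)]
      unfold dp_with_accum
      rw [PySem.List.pyRange_one_eq_nil (le_refl 1)]
      simp only [List.foldl_nil]
      rw [show ((1 : Int) - 1).toNat = 0 from rfl, cc_zero]
      decide
    · rw [A_result SS K hN (hbd h2), B_result SS K hN, modM_cc]
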